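-- pv_equiv track=rewrite | github.com/Ben-Edwards44/Advent-Of-Code | 2023/day11.py | get_intercept_num
-- ===== SOURCE A (Python) =====
-- def get_intercept_num(set, start, end):
--     num = 0
--     start_inx = min(start, end)
--     end_inx = max(start, end)
--
--     for i in range(start_inx, end_inx):
--         if i in set:
--             num += 1
--
--     return num
-- ===== SOURCE B (Python) =====
-- def get_intercept_num(set, start, end):
--     lo = min(start, end)
--     hi = max(start, end)
--     return len({x for x in set if lo <= x < hi})
-- ===== Notes on version B (the rewrite author's own statement) =====
-- stated objective: alternative
-- what changed: B makes one pass over the set's elements, counting the distinct ones inside [min(start,end), max(start,end)), instead of iterating over every integer index of the interval and testing membership.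
import Mathlib
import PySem

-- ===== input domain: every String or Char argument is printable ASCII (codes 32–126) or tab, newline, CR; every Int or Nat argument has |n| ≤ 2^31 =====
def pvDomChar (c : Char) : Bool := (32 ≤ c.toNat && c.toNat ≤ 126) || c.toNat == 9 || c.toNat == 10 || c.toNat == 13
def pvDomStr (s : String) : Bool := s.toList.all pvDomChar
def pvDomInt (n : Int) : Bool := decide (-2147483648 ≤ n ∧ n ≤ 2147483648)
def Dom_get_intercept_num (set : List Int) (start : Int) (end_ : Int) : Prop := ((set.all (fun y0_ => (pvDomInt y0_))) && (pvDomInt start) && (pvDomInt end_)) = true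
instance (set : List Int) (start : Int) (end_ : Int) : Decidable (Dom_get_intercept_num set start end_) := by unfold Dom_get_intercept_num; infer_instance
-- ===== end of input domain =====

-- B counts the distinct elements of `set` lying in [min(start,end), max(start,end)) in one
-- pass over `set`, instead of scanning every index of the interval (objective: alternative).

-- ===== PORT A =====
def get_intercept_num (set : List Int) (start : Int) (end_ : Int) : Int :=
  let start_inx := min start end_
  let end_inx := max start end_
  (PySem.List.pyRange start_inx end_inx 1).foldl
    (fun num i => if i ∈ set then num + 1 else num) 0

-- ===== PORT B =====
def get_intercept_num_alt (set : List Int) (start : Int) (end_ : Int) : Int :=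
  let lo := min start end_
  let hi := max start end_
  ((PySem.Set.ofList (set.filter (fun x => decide (lo ≤ x ∧ x < hi)))).length : Int)

-- ===== PRECONDITION & SPEC =====
def Spec_get_intercept_num (set : List Int) (start : Int) (end_ : Int) (out : Int) : Prop := out = get_intercept_num_alt set start end_
instance (set : List Int) (start : Int) (end_ : Int) (out : Int) : Decidable (Spec_get_intercept_num set start end_ out) := by unfold Spec_get_intercept_num; infer_instance

-- ===== CLAIM (what is proved, stated in full; the proofs are below) =====
def Claim_equal_get_intercept_num : Prop := ∀ (set : List Int) (start : Int) (end_ : Int), Dom_get_intercept_num set start end_ → Spec_get_intercept_num set start end_ (get_intercept_num set start end_)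

-- ===== LEMMAS AND PROOFS =====

-- The interval indices that lie in `set` and the distinct in-interval elements of `set`
-- are two Nodup lists with the same membership, hence a permutation: equal lengths.
theorem pv_count_perm (set : List Int) (lo hi : Int) :
    ((PySem.List.pyRange lo hi 1).filter (fun i => decide (i ∈ set))).length
      = (PySem.Set.ofList (set.filter (fun x => decide (lo ≤ x ∧ x < hi)))).length := by
  apply List.Perm.length_eq
  rw [List.perm_ext_iff_of_nodup
        ((PySem.List.nodup_pyRange_one lo hi).filter _)
        (PySem.Set.nodup_ofList _)]
  intro a
  simp [PySem.Set.mem_ofList, List.mem_filter, PySem.List.mem_pyRange_one]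
  tauto

theorem get_intercept_num_eq (set : List Int) (start end_ : Int) :
    get_intercept_num set start end_ = get_intercept_num_alt set start end_ := by
  unfold get_intercept_num get_intercept_num_alt
  simp only []
  rw [show (fun num i => if i ∈ set then num + 1 else num) = (fun (num : Int) i => if decide (i ∈ set) = true then num + 1 else num) from by funext num i; simp]
  rw [PySem.List.foldl_count_if (fun i => decide (i ∈ set))]
  rw [List.countP_eq_length_filter]
  rw [pv_count_perm]
  simp

-- ===== VERDICT (by name: the statement is the Claim_ definition above) =====
theorem get_intercept_num_spec : Claim_equal_get_intercept_num := by
  intro set start end_ _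
  exact (get_intercept_num_eq set start end_)
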